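-- pv_equiv track=rewrite | github.com/sbreining/AdventOfCode2020 | day_09/p1.py | find_invalid_number
-- ===== SOURCE A (Python) =====
-- preamble = 25
--
-- def find_invalid_number(values):
--     '''
--     We are informed that any given number has a pair that sums to it
--     in a given subset behind it in the list. So we are lookin for a
--     value that breaks this rule, and return that value.
--     '''
--     itr = preamble
--     while itr < len(values):
--         i = itr - preamble
--         val_to_check = values[itr]
--         has_pair = False
--
--         while i < itr:
--             compliment = val_to_check - values[i]
--             if compliment in values[i:itr]:
--                 has_pair = True
--                 break
--             i += 1
--
--         if not has_pair:
--             return val_to_check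
--
--         itr += 1
--
--     return -1
-- ===== SOURCE B (Python) =====
-- preamble = 25
--
-- def find_invalid_number(values):
--     '''
--     Return the first value (after the preamble) that is not the sum of
--     two entries (an entry may be used twice, as A's slice check allows)
--     from the preceding `preamble` values; -1 if every value checks out.
--     Per value: sort the window, then a two-pointer sweep for the target sum.
--     '''
--     for itr in range(preamble, len(values)):
--         target = values[itr]
--         w = sorted(values[itr - preamble:itr])
--         lo, hi = 0, len(w) - 1
--         found = False
--         while lo <= hi:
--             s = w[lo] + w[hi]
--             if s == target:
--                 found = True
--                 break
--             elif s < target: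
--                 lo += 1
--             else:
--                 hi -= 1
--         if not found:
--             return target
--     return -1
-- ===== Notes on version B (the rewrite author's own statement) =====
-- stated objective: alternative
-- what changed: Replaced A's nested scan (for each window index, a linear membership search of the slice for the complement) by sorting each 25-element window and running a classic two-pointer sweep from both ends to decide whether two window entries sum to the target.
import Mathlib
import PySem

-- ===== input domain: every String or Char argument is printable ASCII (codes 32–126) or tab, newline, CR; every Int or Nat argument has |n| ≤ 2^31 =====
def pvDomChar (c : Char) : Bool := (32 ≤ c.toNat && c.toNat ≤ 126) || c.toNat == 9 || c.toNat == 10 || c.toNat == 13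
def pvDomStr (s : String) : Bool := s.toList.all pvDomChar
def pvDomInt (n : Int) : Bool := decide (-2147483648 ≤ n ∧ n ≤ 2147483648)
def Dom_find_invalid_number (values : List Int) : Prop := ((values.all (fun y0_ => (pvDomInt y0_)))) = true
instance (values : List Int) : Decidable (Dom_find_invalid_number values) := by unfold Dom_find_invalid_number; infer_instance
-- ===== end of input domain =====

-- B replaces A's nested scan (per window index, a linear slice-membership search for the
-- complement) by sorting each window and a two-pointer sweep; objective: alternative.

-- ===== PORT A =====
-- inner 'while i < itr' loop of A; state: i
def pvAInner (values : List Int) (valToCheck : Int) (itr : Nat) (i : Nat) : Bool :=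
  if i < itr then
    let compliment := valToCheck - PySem.List.pyGetD values (i : Int) 0  -- values[i], in range whenever called by A
    if (PySem.List.slice values (some (i : Int)) (some (itr : Int))).contains compliment then true
    else pvAInner values valToCheck itr (i + 1)
  else false
termination_by itr - i

-- outer 'while itr < len(values)' loop of A; state: itr
def pvAOuter (values : List Int) (itr : Nat) : Int :=
  if itr < values.length then
    let i := itr - 25
    let valToCheck := PySem.List.pyGetD values (itr : Int) 0
    let hasPair := pvAInner values valToCheck itr i
    if !hasPair then valToCheck else pvAOuter values (itr + 1)
  else -1
termination_by values.length - itr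

def find_invalid_number (values : List Int) : Int := pvAOuter values 25

-- ===== PORT B =====
-- the 'while lo <= hi' two-pointer loop of B (returns the 'found' flag)
def pvTwoPtr (w : List Int) (target : Int) (lo hi : Int) : Bool :=
  if _h : lo ≤ hi then
    let s := PySem.List.pyGetD w lo 0 + PySem.List.pyGetD w hi 0
    if s = target then true
    else if s < target then pvTwoPtr w target (lo + 1) hi
    else pvTwoPtr w target lo (hi - 1)
  else false
termination_by (hi + 1 - lo).toNat

-- 'for itr in range(preamble, len(values))' loop of B with early return
def pvBLoop (values : List Int) (itr : Nat) : Int :=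
  if itr < values.length then
    let target := PySem.List.pyGetD values (itr : Int) 0
    let w := PySem.List.sorted
      (PySem.List.slice values (some ((itr : Int) - 25)) (some (itr : Int))) (fun x => x) false
    if !(pvTwoPtr w target 0 ((w.length : Int) - 1)) then target
    else pvBLoop values (itr + 1)
  else -1
termination_by values.length - itr

def find_invalid_number_alt (values : List Int) : Int := pvBLoop values 25

-- ===== PRECONDITION & SPEC =====
def Spec_find_invalid_number (values : List Int) (out : Int) : Prop := out = find_invalid_number_alt values
instance (values : List Int) (out : Int) : Decidable (Spec_find_invalid_number values out) := by unfold Spec_find_invalid_number; infer_instance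

-- ===== CLAIM =====
def Claim_equal_find_invalid_number : Prop := ∀ (values : List Int), Dom_find_invalid_number values → Spec_find_invalid_number values (find_invalid_number values)

-- ===== LEMMAS AND PROOFS =====

-- A's inner loop, restated structurally on the slice values[i:itr]
def pvPHelp (val : Int) : List Int → Bool
  | [] => false
  | a :: rest => (a :: rest).contains (val - a) || pvPHelp val rest

theorem pv_slice_cons (values : List Int) (i itr : Nat) (h1 : i < itr) (h2 : itr ≤ values.length) :
    PySem.List.slice values (some (i : Int)) (some (itr : Int)) =
      values[i]'(lt_of_lt_of_le h1 h2) ::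
        PySem.List.slice values (some ((i + 1 : Nat) : Int)) (some (itr : Int)) := by
  rw [PySem.List.slice_natCast, PySem.List.slice_natCast]
  rw [List.drop_eq_getElem_cons (lt_of_lt_of_le h1 h2)]
  have : itr - i = (itr - (i + 1)) + 1 := by omega
  rw [this, List.take_succ_cons]

theorem pv_inner_eq_pHelp (values : List Int) (val : Int) (itr : Nat)
    (h2 : itr ≤ values.length) :
    ∀ i, pvAInner values val itr i =
      pvPHelp val (PySem.List.slice values (some (i : Int)) (some (itr : Int))) := by
  intro i
  induction' hind : itr - i using Nat.strong_induction_on with n ih generalizing i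
  rw [pvAInner]
  by_cases h : i < itr
  · have hi : i < values.length := lt_of_lt_of_le h h2
    have hget : PySem.List.pyGetD values (i : Int) 0 = values[i] := by
      simp [PySem.List.pyGetD_natCast, List.getD_eq_getElem?_getD, List.getElem?_eq_getElem hi]
    have ihr := ih (itr - (i + 1)) (by omega) (i + 1) rfl
    push_cast at ihr
    have hcons := pv_slice_cons values i itr h h2
    push_cast at hcons
    rw [if_pos h, hget, hcons, pvPHelp, ihr]
    exact (by decide : ∀ (c x : Bool), (if c = true then true else x) = (c || x)) _ _
  · rw [if_neg h]
    have hnil : PySem.List.slice values (some (i : Int)) (some (itr : Int)) = [] := by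
      rw [PySem.List.slice_natCast]
      have : itr - i = 0 := by omega
      simp [this]
    rw [hnil, pvPHelp]

theorem pv_pHelp_iff (val : Int) (L : List Int) :
    pvPHelp val L = true ↔ ∃ x ∈ L, (val - x) ∈ L := by
  induction L with
  | nil => simp [pvPHelp]
  | cons a rest ih =>
    rw [pvPHelp, Bool.or_eq_true, List.contains_iff_mem, ih]
    constructor
    · rintro (hmem | ⟨x, hx, hvx⟩)
      · exact ⟨a, List.mem_cons_self, hmem⟩
      · exact ⟨x, List.mem_cons_of_mem a hx, List.mem_cons_of_mem a hvx⟩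
    · rintro ⟨x, hx, hvx⟩
      rcases List.mem_cons.mp hx with rfl | hx'
      · exact Or.inl hvx
      · rcases List.mem_cons.mp hvx with heq | hvx'
        · left
          have : val - a = x := by omega
          rw [this]; exact hx
        · exact Or.inr ⟨x, hx', hvx'⟩

-- two-pointer invariant: on a (getD-)monotone list, pvTwoPtr decides the two-sum
-- existence over index pairs lo ≤ i ≤ j ≤ hi
theorem pv_twoPtr_iff (w : List Int) (t : Int)
    (hmono : ∀ p q : Nat, p ≤ q → q < w.length → w.getD p 0 ≤ w.getD q 0) :
    ∀ lo hi : Int, 0 ≤ lo → hi < (w.length : Int) →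
      (pvTwoPtr w t lo hi = true ↔
        ∃ i j : Nat, lo ≤ (i : Int) ∧ i ≤ j ∧ (j : Int) ≤ hi ∧ w.getD i 0 + w.getD j 0 = t) := by
  intro lo hi hlo hhi
  induction' hind : (hi + 1 - lo).toNat using Nat.strong_induction_on with n ih generalizing lo hi
  rw [pvTwoPtr]
  by_cases h : lo ≤ hi
  · rw [dif_pos h]
    have hloN : lo = ((lo.toNat : Nat) : Int) := by omega
    have hhiN : hi = ((hi.toNat : Nat) : Int) := by omega
    have hglo : PySem.List.pyGetD w lo 0 = w.getD lo.toNat 0 := by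
      rw [hloN, PySem.List.pyGetD_natCast]; simp; congr 2; omega
    have hghi : PySem.List.pyGetD w hi 0 = w.getD hi.toNat 0 := by
      rw [hhiN, PySem.List.pyGetD_natCast]; simp; congr 2; omega
    simp only [hglo, hghi]
    set a := w.getD lo.toNat 0 with ha
    set b := w.getD hi.toNat 0 with hb
    by_cases heq : a + b = t
    · rw [if_pos heq]
      constructor
      · intro _
        exact ⟨lo.toNat, hi.toNat, by omega, by omega, by omega, heq⟩
      · intro _; rfl
    · rw [if_neg heq]
      by_cases hlt : a + b < t
      · rw [if_pos hlt]
        rw [ih (hi + 1 - (lo + 1)).toNat (by omega) (lo + 1) hi (by omega) hhi rfl]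
        constructor
        · rintro ⟨i, j, h1, h2, h3, h4⟩
          exact ⟨i, j, by omega, h2, h3, h4⟩
        · rintro ⟨i, j, h1, h2, h3, h4⟩
          by_cases hcase : lo + 1 ≤ (i : Int)
          · exact ⟨i, j, hcase, h2, h3, h4⟩
          · exfalso
            have hieq : i = lo.toNat := by omega
            have hjb : w.getD j 0 ≤ b := by
              rw [hb]; exact hmono j hi.toNat (by omega) (by omega)
            rw [hieq] at h4
            omega
      · rw [if_neg hlt]
        rw [ih (hi - 1 + 1 - lo).toNat (by omega) lo (hi - 1) hlo (by omega) rfl]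
        constructor
        · rintro ⟨i, j, h1, h2, h3, h4⟩
          exact ⟨i, j, h1, h2, by omega, h4⟩
        · rintro ⟨i, j, h1, h2, h3, h4⟩
          by_cases hcase : (j : Int) ≤ hi - 1
          · exact ⟨i, j, h1, h2, hcase, h4⟩
          · exfalso
            have hjeq : j = hi.toNat := by omega
            have hia : a ≤ w.getD i 0 := by
              rw [ha]; exact hmono lo.toNat i (by omega) (by omega)
            rw [hjeq] at h4
            omega
  · rw [dif_neg h]
    constructor
    · intro hf; exact absurd hf (by decide)
    · rintro ⟨i, j, h1, h2, h3, _⟩; omega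

-- top-level form of the two-pointer check on a sorted list
theorem pv_twoPtr_sorted_iff (L : List Int) (t : Int) :
    (pvTwoPtr (PySem.List.sorted L (fun x => x) false) t 0
        (((PySem.List.sorted L (fun x => x) false).length : Int) - 1) = true)
      ↔ ∃ x ∈ L, (t - x) ∈ L := by
  set w := PySem.List.sorted L (fun x => x) false with hw
  have hmono : ∀ p q : Nat, p ≤ q → q < w.length → w.getD p 0 ≤ w.getD q 0 := by
    intro p q hpq hq
    have hp : p < w.length := lt_of_le_of_lt hpq hq
    rw [List.getD_eq_getElem _ _ hp, List.getD_eq_getElem _ _ hq]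
    exact PySem.List.sorted_id_getElem_mono L hpq hq
  have hmemw : ∀ x : Int, x ∈ w ↔ x ∈ L := by
    intro x; rw [hw]; exact PySem.List.mem_sorted L (fun x => x) false x
  rw [pv_twoPtr_iff w t hmono 0 ((w.length : Int) - 1) le_rfl (by omega)]
  constructor
  · rintro ⟨i, j, h1, h2, h3, h4⟩
    have hj : j < w.length := by omega
    have hi : i < w.length := lt_of_le_of_lt h2 hj
    refine ⟨w.getD i 0, (hmemw _).mp ?_, ?_⟩
    · rw [List.getD_eq_getElem _ _ hi]; exact List.getElem_mem hi
    · have : t - w.getD i 0 = w.getD j 0 := by omega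
      rw [this, ← hmemw, List.getD_eq_getElem _ _ hj]
      exact List.getElem_mem hj
  · rintro ⟨x, hx, htx⟩
    obtain ⟨i, hi, hxi⟩ := List.getElem_of_mem ((hmemw x).mpr hx)
    obtain ⟨j, hj, htxj⟩ := List.getElem_of_mem ((hmemw (t - x)).mpr htx)
    rcases le_total i j with hij | hji
    · exact ⟨i, j, by omega, hij, by omega,
        by rw [List.getD_eq_getElem _ _ hi, List.getD_eq_getElem _ _ hj, hxi, htxj]; omega⟩
    · exact ⟨j, i, by omega, hji, by omega,
        by rw [List.getD_eq_getElem _ _ hj, List.getD_eq_getElem _ _ hi, hxi, htxj]; omega⟩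

theorem pv_loops_eq (values : List Int) :
    ∀ itr, 25 ≤ itr → pvAOuter values itr = pvBLoop values itr := by
  intro itr h25
  induction' hind : values.length - itr using Nat.strong_induction_on with n ih generalizing itr
  rw [pvAOuter, pvBLoop]
  by_cases h : itr < values.length
  · simp only [if_pos h]
    have hcast : ((itr : Int) - 25) = (((itr - 25 : Nat)) : Int) := by omega
    set L := PySem.List.slice values (some ((itr : Int) - 25)) (some (itr : Int)) with hL
    set wl := PySem.List.sorted L (fun x => x) false with hwl
    have hcond : pvAInner values (PySem.List.pyGetD values (itr : Int) 0) itr (itr - 25)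
        = pvTwoPtr wl (PySem.List.pyGetD values (itr : Int) 0) 0 ((wl.length : Int) - 1) := by
      rw [pv_inner_eq_pHelp values _ itr (le_of_lt h) (itr - 25)]
      rw [Bool.eq_iff_iff, pv_pHelp_iff]
      rw [hwl, pv_twoPtr_sorted_iff L _]
      rw [hL, hcast]
    rw [hcond]
    cases hp : pvTwoPtr wl (PySem.List.pyGetD values (itr : Int) 0) 0 ((wl.length : Int) - 1)
    · rfl
    · simp only [Bool.not_true, if_neg (by decide : ¬ (false = true))]
      exact ih (values.length - (itr + 1)) (by omega) (itr + 1) (by omega) rfl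
  · simp [h]

-- ===== VERDICT =====
theorem find_invalid_number_spec : Claim_equal_find_invalid_number := by
  intro values _
  unfold Spec_find_invalid_number find_invalid_number find_invalid_number_alt
  exact pv_loops_eq values 25 le_rfl
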